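-- pv_equiv track=rewrite | github.com/bayronidk/ADA | Lab6.Ejem.py | policeThief
-- ===== SOURCE A (Python) =====
-- def policeThief(arr, n, k):
--     i = 0
--     l = 0
--     r = 0
--     res = 0
--     thi = []
--     pol = []
--
--     # Almacena índices en listas
--     while i < n:
--         if arr[i] == 'P':
--             pol.append(i)
--         elif arr[i] == 'T':
--             thi.append(i)
--         i += 1
--
--     # Rastrea los índices mínimos actuales de ladrones (thief) y policías (police)
--     while l < len(thi) and r < len(pol):
--         # Puede ser capturado
--         if abs(thi[l] - pol[r]) <= k:
--             res += 1
--             l += 1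
--             r += 1
--         # Incrementa el índice mínimo
--         elif thi[l] < pol[r]:
--             l += 1
--         else:
--             r += 1
--
--     return res
-- ===== SOURCE B (Python) =====
-- def policeThief(arr, n, k):
--     res = 0
--     polQ = []  # pending police indices, oldest first
--     thiQ = []  # pending thief indices, oldest first
--     for i in range(n):
--         while polQ and polQ[0] < i - k:
--             polQ.pop(0)
--         while thiQ and thiQ[0] < i - k:
--             thiQ.pop(0)
--         c = arr[i]
--         if c == 'P':
--             if thiQ:
--                 thiQ.pop(0)
--                 res += 1
--             else:
--                 polQ.append(i)
--         elif c == 'T':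
--             if polQ:
--                 polQ.pop(0)
--                 res += 1
--             else:
--                 thiQ.append(i)
--     return res
-- ===== Notes on version B (the rewrite author's own statement) =====
-- stated objective: alternative
-- what changed: Replaced the build-two-index-lists-then-two-pointer-merge with a single interleaved scan that maintains FIFO queues of pending unmatched indices, pruning entries older than i-k as it goes.
import Mathlib
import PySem

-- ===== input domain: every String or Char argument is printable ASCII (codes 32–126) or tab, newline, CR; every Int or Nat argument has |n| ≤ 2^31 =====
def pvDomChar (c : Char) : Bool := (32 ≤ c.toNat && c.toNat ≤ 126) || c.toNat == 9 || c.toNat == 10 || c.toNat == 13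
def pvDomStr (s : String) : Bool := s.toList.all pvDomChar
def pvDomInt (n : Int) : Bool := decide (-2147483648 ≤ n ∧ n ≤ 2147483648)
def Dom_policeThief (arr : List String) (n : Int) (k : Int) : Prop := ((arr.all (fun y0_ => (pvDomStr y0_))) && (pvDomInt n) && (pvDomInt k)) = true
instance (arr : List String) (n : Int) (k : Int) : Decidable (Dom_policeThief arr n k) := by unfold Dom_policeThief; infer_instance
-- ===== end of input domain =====

-- B replaces A's build-two-index-lists-then-two-pointer-merge by one interleaved scan
-- keeping FIFO queues of pending unmatched indices (alternative decomposition, same cost).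

-- ===== PORT A =====
-- first while loop of A: collect indices of 'P' and 'T'
def pvBuildLoop (arr : List String) (n : Int) (i : Int) (pol thi : List Int) :
    List Int × List Int :=
  if _h : i < n then
    match PySem.List.pyGet? arr i with
    | some c =>
      if c == "P" then pvBuildLoop arr n (i + 1) (pol ++ [i]) thi
      else if c == "T" then pvBuildLoop arr n (i + 1) pol (thi ++ [i])
      else pvBuildLoop arr n (i + 1) pol thi
    | none => (pol, thi)   -- Python raises IndexError here (outside Pre_)
  else (pol, thi)
  termination_by (n - i).toNat
  decreasing_by all_goals omega

-- second while loop of A: two pointers l, r over thi and pol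
def pvMatchLoop (k : Int) (thi pol : List Int) (l r res : Int) : Int :=
  if _h : l < (thi.length : Int) ∧ r < (pol.length : Int) then
    match PySem.List.pyGet? thi l, PySem.List.pyGet? pol r with
    | some t, some p =>
      if |t - p| ≤ k then pvMatchLoop k thi pol (l + 1) (r + 1) (res + 1)
      else if t < p then pvMatchLoop k thi pol (l + 1) r res
      else pvMatchLoop k thi pol l (r + 1) res
    | _, _ => res   -- unreachable: guard ensures both in range
  else res
  termination_by ((thi.length : Int) - l).toNat + ((pol.length : Int) - r).toNat
  decreasing_by all_goals omega

def policeThief (arr : List String) (n : Int) (k : Int) : Int :=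
  match pvBuildLoop arr n 0 [] [] with
  | (pol, thi) => pvMatchLoop k thi pol 0 0 0

-- ===== PORT B =====
-- the inner 'while q and q[0] < m: q.pop(0)' loops of B
def pvPrune (q : List Int) (m : Int) : List Int :=
  match q with
  | [] => []
  | x :: xs => if x < m then pvPrune xs m else x :: xs

-- one iteration of B's for-loop: prune both queues, then dispatch on arr[i]
def pvStep (arr : List String) (k : Int) (st : Int × List Int × List Int) (i : Int) :
    Int × List Int × List Int :=
  let res := st.1
  let polQ := pvPrune st.2.1 (i - k)
  let thiQ := pvPrune st.2.2 (i - k)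
  match PySem.List.pyGet? arr i with
  | some c =>
    if c == "P" then
      match thiQ with
      | _ :: ts => (res + 1, polQ, ts)
      | [] => (res, polQ ++ [i], thiQ)
    else if c == "T" then
      match polQ with
      | _ :: ps => (res + 1, ps, thiQ)
      | [] => (res, polQ, thiQ ++ [i])
    else (res, polQ, thiQ)
  | none => (res, polQ, thiQ)   -- Python raises IndexError here (outside Pre_)

def policeThief_alt (arr : List String) (n : Int) (k : Int) : Int :=
  ((PySem.List.pyRange 0 n 1).foldl (pvStep arr k) (0, [], [])).1

-- ===== PRECONDITION & SPEC =====
-- Pre_ excludes n > len(arr), on which A raises IndexError in its first loop; A returns on everything else.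
def Pre_policeThief (arr : List String) (n : Int) (k : Int) : Prop :=
  n ≤ (arr.length : Int)
instance (arr : List String) (n : Int) (k : Int) : Decidable (Pre_policeThief arr n k) := by
  unfold Pre_policeThief; infer_instance

def pvWitness_policeThief : List String × Int × Int := (["P", "X", "T", "T", "P"], 5, 2)

def Spec_policeThief (arr : List String) (n : Int) (k : Int) (out : Int) : Prop :=
  out = policeThief_alt arr n k
instance (arr : List String) (n : Int) (k : Int) (out : Int) : Decidable (Spec_policeThief arr n k out) := by
  unfold Spec_policeThief; infer_instance

-- ===== CLAIM (what is proved, stated in full; the proofs are below) =====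
def Claim_equal_policeThief : Prop := ∀ (arr : List String) (n : Int) (k : Int), Dom_policeThief arr n k → Pre_policeThief arr n k → Spec_policeThief arr n k (policeThief arr n k)

-- ===== LEMMAS AND PROOFS =====

-- clean recursive form of A's two-pointer loop, consuming suffixes
def pvMatchRec (k : Int) : List Int → List Int → Int
  | t :: ts, p :: ps =>
      if |t - p| ≤ k then 1 + pvMatchRec k ts ps
      else if t < p then pvMatchRec k ts (p :: ps)
      else pvMatchRec k (t :: ts) ps
  | _, _ => 0

-- tag test used to characterise A's first loop as a filter
def pvIsTag (arr : List String) (s : String) (j : Int) : Bool :=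
  PySem.List.pyGet? arr j == some s

theorem drop_cons (xs : List Int) (l : Nat) (h : l < xs.length) :
    xs.drop l = xs[l] :: xs.drop (l+1) := (List.getElem_cons_drop h).symm

theorem pvMatchLoop_eq (k : Int) (thi pol : List Int) (l r : Nat) (res : Int) :
    pvMatchLoop k thi pol l r res = res + pvMatchRec k (thi.drop l) (pol.drop r) := by
  by_cases hl : l < thi.length
  · by_cases hr : r < pol.length
    · rw [drop_cons thi l hl, drop_cons pol r hr]
      rw [pvMatchLoop]
      have hg : ((l:Int) < (thi.length : Int) ∧ (r:Int) < (pol.length : Int)) := by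
        constructor <;> exact_mod_cast ‹_›
      rw [dif_pos hg]
      rw [PySem.List.pyGet?_natCast, PySem.List.pyGet?_natCast,
          List.getElem?_eq_getElem hl, List.getElem?_eq_getElem hr]
      simp only [pvMatchRec]
      split
      · have := pvMatchLoop_eq k thi pol (l+1) (r+1) (res+1)
        push_cast at this ⊢; rw [this]; ring
      · split
        · have := pvMatchLoop_eq k thi pol (l+1) r res
          push_cast at this ⊢; rw [this, drop_cons pol r hr]
        · have := pvMatchLoop_eq k thi pol l (r+1) res
          push_cast at this ⊢; rw [this, drop_cons thi l hl]
    · have hg : ¬((l:Int) < (thi.length : Int) ∧ (r:Int) < (pol.length : Int)) := by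
        omega
      rw [pvMatchLoop, dif_neg hg, List.drop_eq_nil_of_le (show pol.length ≤ r by omega)]
      cases thi.drop l <;> simp [pvMatchRec]
  · have hg : ¬((l:Int) < (thi.length : Int) ∧ (r:Int) < (pol.length : Int)) := by
      omega
    rw [pvMatchLoop, dif_neg hg, List.drop_eq_nil_of_le (show thi.length ≤ l by omega)]
    simp [pvMatchRec]
termination_by (thi.length - l) + (pol.length - r)
decreasing_by all_goals omega

theorem pvBuildLoop_eq (arr : List String) (n : Int) (i : Int) (pol thi : List Int)
    (hi : 0 ≤ i) (hn : n ≤ (arr.length : Int)) :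
    pvBuildLoop arr n i pol thi =
      (pol ++ (PySem.List.pyRange i n 1).filter (pvIsTag arr "P"),
       thi ++ (PySem.List.pyRange i n 1).filter (pvIsTag arr "T")) := by
  by_cases h : i < n
  · obtain ⟨c, hget⟩ : ∃ c, PySem.List.pyGet? arr i = some c :=
      ⟨_, PySem.List.pyGet?_eq_some_getElem _ hi (by omega)⟩
    rw [pvBuildLoop, dif_pos h, hget, PySem.List.pyRange_one_cons h]
    simp only [List.filter_cons, pvIsTag, hget]
    by_cases hP : c = "P"
    · have hb : ((some c == some ("P":String)) = true) := by simp [hP]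
      have hb2 : ((some c == some ("T":String)) = false) := by simp [hP]
      simp only [hb, hb2, if_true, if_false, Bool.false_eq_true]
      rw [if_pos (show (c == "P") = true by simp [hP]), pvBuildLoop_eq arr n (i+1) (pol ++ [i]) thi (by omega) hn]
      simp [List.append_assoc]
    · have hb : ((some c == some ("P":String)) = false) := by simp [hP]
      by_cases hT : c = "T"
      · have hb2 : ((some c == some ("T":String)) = true) := by simp [hT]
        simp only [hb, hb2, if_true, if_false, Bool.false_eq_true]
        rw [if_neg (show ¬ (c == "P") = true by simp [hP]), if_pos (show (c == "T") = true by simp [hT]), pvBuildLoop_eq arr n (i+1) pol (thi ++ [i]) (by omega) hn]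
        simp [List.append_assoc]
      · have hb2 : ((some c == some ("T":String)) = false) := by simp [hT]
        simp only [hb, hb2, if_false, Bool.false_eq_true]
        rw [if_neg (show ¬ (c == "P") = true by simp [hP]), if_neg (show ¬ (c == "T") = true by simp [hT]), pvBuildLoop_eq arr n (i+1) pol thi (by omega) hn]
  · rw [pvBuildLoop, dif_neg h, PySem.List.pyRange_one_eq_nil (by omega)]
    simp
termination_by (n - i).toNat
decreasing_by all_goals omega

theorem pvMatchRec_nil_left (k : Int) (pol : List Int) : pvMatchRec k [] pol = 0 := by
  cases pol <;> simp [pvMatchRec]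
theorem pvMatchRec_nil_right (k : Int) (thi : List Int) : pvMatchRec k thi [] = 0 := by
  cases thi <;> simp [pvMatchRec]
theorem pvPrune_subset (q : List Int) (m : Int) : ∀ x ∈ pvPrune q m, x ∈ q := by
  induction q with
  | nil => simp [pvPrune]
  | cons a as ih =>
    intro x hx
    simp only [pvPrune] at hx
    split at hx
    · exact List.mem_cons_of_mem a (ih x hx)
    · exact hx
theorem pvPrune_head (q : List Int) (m t : Int) (ts : List Int)
    (h : pvPrune q m = t :: ts) : m ≤ t := by
  induction q with
  | nil => simp [pvPrune] at h
  | cons a as ih =>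
    simp only [pvPrune] at h
    split at h
    · exact ih h
    · cases h; omega
theorem pvPrune_nil (m : Int) : pvPrune [] m = [] := rfl
theorem pvMatchRec_prune_left (k m : Int) (u v pol : List Int)
    (h : ∀ p ps, pol = p :: ps → m + k ≤ p ∧ ∀ x ∈ u, x < p) :
    pvMatchRec k (pvPrune u m ++ v) pol = pvMatchRec k (u ++ v) pol := by
  induction u with
  | nil => rfl
  | cons x xs ih =>
    simp only [pvPrune]
    split
    · rename_i hx
      rw [ih (fun p ps hp => ⟨(h p ps hp).1, fun y hy => (h p ps hp).2 y (List.mem_cons_of_mem x hy)⟩)]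
      cases pol with
      | nil => rw [pvMatchRec_nil_right, pvMatchRec_nil_right]
      | cons p ps =>
        obtain ⟨h1, h2⟩ := h p ps rfl
        have hxp : x < p := h2 x (List.mem_cons_self ..)
        have : ¬ |x - p| ≤ k := by
          rw [abs_sub_comm, abs_of_nonneg (by omega)]; omega
        simp only [List.cons_append, pvMatchRec, this, if_false, hxp, if_true]
    · rfl
theorem pvMatchRec_prune_right (k m : Int) (u v thi : List Int)
    (h : ∀ t ts, thi = t :: ts → m + k ≤ t ∧ ∀ x ∈ u, x < t) :
    pvMatchRec k thi (pvPrune u m ++ v) = pvMatchRec k thi (u ++ v) := by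
  induction u with
  | nil => rfl
  | cons x xs ih =>
    simp only [pvPrune]
    split
    · rename_i hx
      rw [ih (fun t ts ht => ⟨(h t ts ht).1, fun y hy => (h t ts ht).2 y (List.mem_cons_of_mem x hy)⟩)]
      cases thi with
      | nil => rw [pvMatchRec_nil_left, pvMatchRec_nil_left]
      | cons t ts =>
        obtain ⟨h1, h2⟩ := h t ts rfl
        have hxt : x < t := h2 x (List.mem_cons_self ..)
        have hne : ¬ |t - x| ≤ k := by
          rw [abs_of_nonneg (by omega)]; omega
        have hnl : ¬ t < x := by omega
        simp only [List.cons_append, pvMatchRec, hne, if_false, hnl]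
    · rfl

theorem pvFold_eq (arr : List String) (k : Int) :
    ∀ (idxs : List Int) (res : Int) (polQ thiQ : List Int),
      (∀ j ∈ idxs, 0 ≤ j ∧ j < (arr.length : Int)) →
      idxs.Pairwise (· < ·) →
      (∀ x ∈ polQ, ∀ j ∈ idxs, x < j) →
      (∀ x ∈ thiQ, ∀ j ∈ idxs, x < j) →
      (polQ = [] ∨ thiQ = []) →
      (idxs.foldl (pvStep arr k) (res, polQ, thiQ)).1 =
        res + pvMatchRec k (thiQ ++ idxs.filter (pvIsTag arr "T"))
                           (polQ ++ idxs.filter (pvIsTag arr "P")) := by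
  intro idxs
  induction idxs with
  | nil =>
    intro res polQ thiQ _ _ _ _ h5
    rcases h5 with h | h <;> subst h <;>
      simp [pvMatchRec_nil_left, pvMatchRec_nil_right]
  | cons i rest ih =>
    intro res polQ thiQ h1 h2 h3 h4 h5
    obtain ⟨hi0, hilen⟩ := h1 i (List.mem_cons_self ..)
    obtain ⟨c, hget⟩ : ∃ c, PySem.List.pyGet? arr i = some c :=
      ⟨_, PySem.List.pyGet?_eq_some_getElem _ hi0 hilen⟩
    have hrestlt : ∀ j ∈ rest, i < j := (List.pairwise_cons.1 h2).1
    have h1' : ∀ j ∈ rest, 0 ≤ j ∧ j < (arr.length : Int) :=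
      fun j hj => h1 j (List.mem_cons_of_mem _ hj)
    have h2' : rest.Pairwise (· < ·) := (List.pairwise_cons.1 h2).2
    have hpolQi : ∀ x ∈ polQ, x < i := fun x hx => h3 x hx i (List.mem_cons_self ..)
    have hthiQi : ∀ x ∈ thiQ, x < i := fun x hx => h4 x hx i (List.mem_cons_self ..)
    have hTcond : ∀ t ts, List.filter (pvIsTag arr "T") rest = t :: ts →
        (i - k) + k ≤ t ∧ ∀ x ∈ polQ, x < t := by
      intro t ts ht
      have htmem : t ∈ rest :=
        List.mem_of_mem_filter (ht ▸ List.mem_cons_self ..)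
      exact ⟨by have := hrestlt t htmem; omega,
             fun x hx => lt_trans (hpolQi x hx) (hrestlt t htmem)⟩
    have hPcond : ∀ p ps, List.filter (pvIsTag arr "P") rest = p :: ps →
        (i - k) + k ≤ p ∧ ∀ x ∈ thiQ, x < p := by
      intro p ps hp
      have hpmem : p ∈ rest :=
        List.mem_of_mem_filter (hp ▸ List.mem_cons_self ..)
      exact ⟨by have := hrestlt p hpmem; omega,
             fun x hx => lt_trans (hthiQi x hx) (hrestlt p hpmem)⟩
    simp only [List.foldl_cons, List.filter_cons, pvIsTag, hget]
    simp only [pvStep, hget]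
    by_cases hP : c = "P"
    · have hbP : ((some c == some ("P" : String)) = true) := by simp [hP]
      have hbT : ((some c == some ("T" : String)) = false) := by simp [hP]
      simp only [hbP, hbT, if_true, Bool.false_eq_true, if_false]
      rw [if_pos (show (c == "P") = true by simp [hP])]
      cases hq : pvPrune thiQ (i - k) with
      | cons t ts =>
        have hthiQne : thiQ ≠ [] := by
          intro h; rw [h] at hq; exact (List.cons_ne_nil _ _) hq.symm
        have hpol : polQ = [] := h5.resolve_right hthiQne
        subst hpol
        show (List.foldl (pvStep arr k) (res + 1, pvPrune [] (i - k), ts) rest).1 =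
          res + pvMatchRec k (thiQ ++ List.filter (pvIsTag arr "T") rest)
            ([] ++ i :: List.filter (pvIsTag arr "P") rest)
        rw [ih (res + 1) (pvPrune [] (i - k)) ts
              h1' h2' (by simp [pvPrune])
              (fun x hx j hj => h4 x (pvPrune_subset _ _ x (hq ▸ List.mem_cons_of_mem t hx))
                 j (List.mem_cons_of_mem _ hj))
              (Or.inl rfl)]
        rw [List.nil_append,
            ← pvMatchRec_prune_left k (i - k) thiQ (List.filter (pvIsTag arr "T") rest)
              (i :: List.filter (pvIsTag arr "P") rest)
              (by rintro p ps ⟨rfl, rfl⟩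
                  exact ⟨by omega, fun x hx => hthiQi x hx⟩),
            hq]
        have ht1 : i - k ≤ t := pvPrune_head _ _ _ _ hq
        have ht2 : t < i := hthiQi t (pvPrune_subset _ _ t (hq ▸ List.mem_cons_self ..))
        have habs : |t - i| ≤ k := by rw [abs_sub_comm, abs_of_nonneg (by omega)]; omega
        simp only [List.cons_append, pvMatchRec, habs, if_true, pvPrune_nil, List.nil_append]
        omega
      | nil =>
        show (List.foldl (pvStep arr k) (res, pvPrune polQ (i - k) ++ [i], ([] : List Int)) rest).1 =
          res + pvMatchRec k (thiQ ++ List.filter (pvIsTag arr "T") rest)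
            (polQ ++ i :: List.filter (pvIsTag arr "P") rest)
        rw [ih res (pvPrune polQ (i - k) ++ [i]) []
              h1' h2'
              (by intro x hx j hj
                  rcases List.mem_append.1 hx with hx | hx
                  · exact h3 x (pvPrune_subset _ _ x hx) j (List.mem_cons_of_mem _ hj)
                  · simp at hx; subst hx; exact hrestlt j hj)
              (by simp) (Or.inr rfl)]
        rcases h5 with hpol | hthi
        · subst hpol
          rw [← pvMatchRec_prune_left k (i - k) thiQ (List.filter (pvIsTag arr "T") rest)
                (([] : List Int) ++ i :: List.filter (pvIsTag arr "P") rest)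
                (by intro p ps hp
                    rw [List.nil_append] at hp
                    obtain ⟨rfl, -⟩ := List.cons.inj hp
                    exact ⟨by omega, fun x hx => hthiQi x hx⟩),
              hq]
          simp [pvPrune]
        · subst hthi
          simp only [List.nil_append]
          rw [List.append_assoc, List.singleton_append,
              pvMatchRec_prune_right k (i - k) polQ
                (i :: List.filter (pvIsTag arr "P") rest)
                (List.filter (pvIsTag arr "T") rest) hTcond]
    · by_cases hT : c = "T"
      · have hbP : ((some c == some ("P" : String)) = false) := by simp [hP]
        have hbT : ((some c == some ("T" : String)) = true) := by simp [hT]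
        simp only [hbP, hbT, if_true, Bool.false_eq_true, if_false]
        rw [if_neg (show ¬ (c == "P") = true by simp [hP]),
            if_pos (show (c == "T") = true by simp [hT])]
        cases hq : pvPrune polQ (i - k) with
        | cons p ps =>
          have hpolQne : polQ ≠ [] := by
            intro h; rw [h] at hq; exact (List.cons_ne_nil _ _) hq.symm
          have hthi : thiQ = [] := h5.resolve_left hpolQne
          subst hthi
          show (List.foldl (pvStep arr k) (res + 1, ps, pvPrune [] (i - k)) rest).1 =
            res + pvMatchRec k ([] ++ i :: List.filter (pvIsTag arr "T") rest)
              (polQ ++ List.filter (pvIsTag arr "P") rest)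
          rw [ih (res + 1) ps (pvPrune [] (i - k))
                h1' h2'
                (fun x hx j hj => h3 x (pvPrune_subset _ _ x (hq ▸ List.mem_cons_of_mem p hx))
                   j (List.mem_cons_of_mem _ hj))
                (by simp [pvPrune])
                (Or.inr rfl)]
          rw [List.nil_append,
              ← pvMatchRec_prune_right k (i - k) polQ (List.filter (pvIsTag arr "P") rest)
                (i :: List.filter (pvIsTag arr "T") rest)
                (by intro t ts ht
                    obtain ⟨rfl, -⟩ := List.cons.inj ht
                    exact ⟨by omega, fun x hx => hpolQi x hx⟩),
              hq]
          have hp1 : i - k ≤ p := pvPrune_head _ _ _ _ hq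
          have hp2 : p < i := hpolQi p (pvPrune_subset _ _ p (hq ▸ List.mem_cons_self ..))
          have habs : |i - p| ≤ k := by rw [abs_of_nonneg (by omega)]; omega
          simp only [List.cons_append, pvMatchRec, habs, if_true, pvPrune_nil, List.nil_append]
          omega
        | nil =>
          show (List.foldl (pvStep arr k) (res, ([] : List Int), pvPrune thiQ (i - k) ++ [i]) rest).1 =
            res + pvMatchRec k (thiQ ++ i :: List.filter (pvIsTag arr "T") rest)
              (polQ ++ List.filter (pvIsTag arr "P") rest)
          rw [ih res [] (pvPrune thiQ (i - k) ++ [i])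
                h1' h2' (by simp)
                (by intro x hx j hj
                    rcases List.mem_append.1 hx with hx | hx
                    · exact h4 x (pvPrune_subset _ _ x hx) j (List.mem_cons_of_mem _ hj)
                    · simp at hx; subst hx; exact hrestlt j hj)
                (Or.inl rfl)]
          rcases h5 with hpol | hthi
          · subst hpol
            simp only [List.nil_append]
            rw [List.append_assoc, List.singleton_append,
                pvMatchRec_prune_left k (i - k) thiQ
                  (i :: List.filter (pvIsTag arr "T") rest)
                  (List.filter (pvIsTag arr "P") rest) hPcond]
          · subst hthi
            simp only [pvPrune_nil, List.nil_append]
            rw [← pvMatchRec_prune_right k (i - k) polQ (List.filter (pvIsTag arr "P") rest)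
                  (i :: List.filter (pvIsTag arr "T") rest)
                  (by intro t ts ht
                      obtain ⟨rfl, -⟩ := List.cons.inj ht
                      exact ⟨by omega, fun x hx => hpolQi x hx⟩),
                hq]
            simp
      · have hbP : ((some c == some ("P" : String)) = false) := by simp [hP]
        have hbT : ((some c == some ("T" : String)) = false) := by simp [hT]
        simp only [hbP, hbT, Bool.false_eq_true, if_false]
        rw [if_neg (show ¬ (c == "P") = true by simp [hP]),
            if_neg (show ¬ (c == "T") = true by simp [hT])]
        rw [ih res (pvPrune polQ (i - k)) (pvPrune thiQ (i - k))
              h1' h2'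
              (fun x hx j hj => h3 x (pvPrune_subset _ _ x hx) j (List.mem_cons_of_mem _ hj))
              (fun x hx j hj => h4 x (pvPrune_subset _ _ x hx) j (List.mem_cons_of_mem _ hj))
              (by rcases h5 with h | h
                  · exact Or.inl (by rw [h]; rfl)
                  · exact Or.inr (by rw [h]; rfl))]
        rcases h5 with hpol | hthi
        · subst hpol
          simp only [pvPrune_nil, List.nil_append]
          rw [pvMatchRec_prune_left k (i - k) thiQ (List.filter (pvIsTag arr "T") rest)
              (List.filter (pvIsTag arr "P") rest) hPcond]
        · subst hthi
          simp only [pvPrune_nil, List.nil_append]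
          rw [pvMatchRec_prune_right k (i - k) polQ (List.filter (pvIsTag arr "P") rest)
              (List.filter (pvIsTag arr "T") rest) hTcond]

-- ===== VERDICT (by name: the statement is the Claim_ definition above) =====
theorem policeThief_spec : Claim_equal_policeThief := by
  intro arr n k _hdom hpre
  unfold Spec_policeThief policeThief policeThief_alt
  rw [pvBuildLoop_eq arr n 0 [] [] le_rfl hpre]
  rw [pvFold_eq arr k (PySem.List.pyRange 0 n 1) 0 [] []
      (fun j hj => by
        have := (PySem.List.mem_pyRange_one).1 hj
        exact ⟨this.1, lt_of_lt_of_le this.2 hpre⟩)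
      (PySem.List.pairwise_lt_pyRange_one 0 n)
      (by simp) (by simp) (Or.inl rfl)]
  simp only [List.nil_append]
  have := pvMatchLoop_eq k ((PySem.List.pyRange 0 n 1).filter (pvIsTag arr "T"))
      ((PySem.List.pyRange 0 n 1).filter (pvIsTag arr "P")) 0 0 0
  simpa using this
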